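-- pv_equiv track=rewrite | github.com/Mango-Juice/Algo-Study | Codeforces/Educational_Round_163/D_Tandem_Repeats.py | posible
-- ===== SOURCE A (Python) =====
-- def posible(s, l):
--     acc = 0
--     for i in range(len(s) - l):
--         if s[i] == s[i + l] or s[i] == "?" or s[i + l] == "?":
--             acc += 1
--             if acc == l:
--                 return True
--         else:
--             acc = 0
--     return False
-- ===== SOURCE B (Python) =====
-- def posible(s, l):
--     m = "".join(
--         "1" if s[i] == s[i + l] or "?" in (s[i], s[i + l]) else "0"
--         for i in range(len(s) - l)
--     )
--     return len(m) >= l and "1" * l in m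
-- ===== Notes on version B (the rewrite author's own statement) =====
-- stated objective: alternative
-- what changed: A runs one accumulate-and-early-return loop counting consecutive matches; B first builds the whole match sequence as a '1'/'0' string and then decides existence of a run by a substring test '1'*l in it.
-- outside the precondition, e.g. on posible('ab', 0): A returns False, B returns True
import Mathlib
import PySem

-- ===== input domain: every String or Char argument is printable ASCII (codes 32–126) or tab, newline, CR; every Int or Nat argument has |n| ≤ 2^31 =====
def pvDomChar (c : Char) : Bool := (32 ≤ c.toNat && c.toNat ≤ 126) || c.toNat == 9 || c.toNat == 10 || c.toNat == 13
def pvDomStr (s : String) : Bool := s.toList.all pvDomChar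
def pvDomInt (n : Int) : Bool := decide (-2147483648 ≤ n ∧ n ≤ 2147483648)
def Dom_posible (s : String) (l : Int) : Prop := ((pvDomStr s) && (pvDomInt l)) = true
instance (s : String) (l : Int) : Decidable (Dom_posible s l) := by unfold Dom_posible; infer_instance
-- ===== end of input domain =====

-- B builds the whole match sequence as a '1'/'0' string first, then decides by a substring test,
-- instead of A's single accumulate-and-early-return loop (objective: alternative decomposition).

-- ===== PORT A =====
def posibleGo (cs : List Char) (l : Int) (idxs : List Int) (acc : Int) : Bool :=
  match idxs with
  | [] => false
  | i :: rest =>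
    match PySem.List.pyGet? cs i, PySem.List.pyGet? cs (i + l) with
    | some a, some b =>
      if a == b || a == '?' || b == '?' then
        if acc + 1 == l then true else posibleGo cs l rest (acc + 1)
      else posibleGo cs l rest 0
    | _, _ => false  -- Python raises IndexError here; excluded by Pre_posible

def posible (s : String) (l : Int) : Bool :=
  posibleGo s.toList l (PySem.List.pyRange 0 ((s.toList.length : Int) - l) 1) 0

-- ===== PORT B =====
-- one entry of the generator inside "".join(...): "1" / "0" as a one-char string (List Char)
def altFlag (cs : List Char) (l : Int) (i : Int) : List Char :=
  match PySem.List.pyGet? cs i, PySem.List.pyGet? cs (i + l) with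
  | some a, some b => if a == b || a == '?' || b == '?' then ['1'] else ['0']
  | _, _ => ['0']  -- Python raises IndexError here; excluded by Pre_posible

def posible_alt (s : String) (l : Int) : Bool :=
  let cs := s.toList
  let m := PySem.Chars.join []
    ((PySem.List.pyRange 0 ((cs.length : Int) - l) 1).map (altFlag cs l))
  decide ((PySem.Chars.len m) ≥ l) && PySem.Chars.isIn (PySem.List.pyRepeat ['1'] l) m

-- ===== PRECONDITION & SPEC =====
-- Pre_ excludes l < 0, where A raises IndexError, and the defensible corner l = 0, where A's run
-- counter can never equal 0 so A returns False while B finds the empty pattern and returns True.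
def Pre_posible (s : String) (l : Int) : Prop := 1 ≤ l
instance (s : String) (l : Int) : Decidable (Pre_posible s l) := by unfold Pre_posible; infer_instance
def pvWitness_posible : String × Int := ("a?ba?b", 3)

def Spec_posible (s : String) (l : Int) (out : Bool) : Prop := out = posible_alt s l
instance (s : String) (l : Int) (out : Bool) : Decidable (Spec_posible s l out) := by unfold Spec_posible; infer_instance

-- ===== CLAIM (what is proved, stated in full; the proofs are below) =====
def Claim_equal_posible : Prop := ∀ (s : String) (l : Int), Dom_posible s l → Pre_posible s l → Spec_posible s l (posible s l)

-- ===== LEMMAS AND PROOFS =====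

-- the Boolean value of one match test (proof-side abstraction of both ports' per-index work)
def pvFlag (cs : List Char) (l : Int) (i : Int) : Bool :=
  match PySem.List.pyGet? cs i, PySem.List.pyGet? cs (i + l) with
  | some a, some b => a == b || a == '?' || b == '?'
  | _, _ => false

-- A's loop with the indexing abstracted away
def pvLoopA (l : Int) (m : List Bool) (acc : Int) : Bool :=
  match m with
  | [] => false
  | b :: rest =>
    if b then (if acc + 1 == l then true else pvLoopA l rest (acc + 1))
    else pvLoopA l rest 0

def pvEnc (b : Bool) : Char := if b then '1' else '0'

theorem altFlag_eq (cs : List Char) (l i : Int) :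
    altFlag cs l i = [pvEnc (pvFlag cs l i)] := by
  unfold altFlag pvFlag pvEnc
  rcases PySem.List.pyGet? cs i with _ | a <;> rcases PySem.List.pyGet? cs (i + l) with _ | b <;>
    simp <;> split <;> simp

theorem posibleGo_eq_loopA (cs : List Char) (l : Int) (hl : 1 ≤ l)
    (idxs : List Int) (acc : Int)
    (h : ∀ i ∈ idxs, 0 ≤ i ∧ i + l < (cs.length : Int)) :
    posibleGo cs l idxs acc = pvLoopA l (idxs.map (pvFlag cs l)) acc := by
  induction idxs generalizing acc with
  | nil => rfl
  | cons i rest ih =>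
    obtain ⟨h0, h1⟩ := h i (List.mem_cons_self ..)
    have hrest : ∀ j ∈ rest, 0 ≤ j ∧ j + l < (cs.length : Int) :=
      fun j hj => h j (List.mem_cons_of_mem _ hj)
    have g1 : PySem.List.pyGet? cs i = some cs[i.toNat] :=
      PySem.List.pyGet?_eq_some_getElem _ (by omega) (by omega)
    have g2 : PySem.List.pyGet? cs (i + l) = some cs[(i + l).toNat] :=
      PySem.List.pyGet?_eq_some_getElem _ (by omega) (by omega)
    simp only [posibleGo, pvLoopA, List.map_cons, pvFlag, g1, g2]
    split
    · split
      · rfl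
      · exact ih (acc + 1) hrest
    · exact ih 0 hrest

-- shift the start of an existential over drops by one
theorem exists_drop_shift (P : List Bool → Prop) (m : List Bool) :
    (∃ j, P (m.drop j)) ↔ P m ∨ ∃ j, P (m.drop (j + 1)) := by
  constructor
  · rintro ⟨j, hj⟩
    cases j with
    | zero => exact Or.inl (by simpa using hj)
    | succ j => exact Or.inr ⟨j, hj⟩
  · rintro (h | ⟨j, hj⟩)
    · exact ⟨0, by simpa⟩
    · exact ⟨j + 1, hj⟩

theorem replicate_prefix_of_le {k n : Nat} (a : Bool) (h : k ≤ n) :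
    List.replicate k a <+: List.replicate n a :=
  ⟨List.replicate (n - k) a, by rw [← List.replicate_add]; congr 1; omega⟩

theorem loopA_iff (L : Nat) (m : List Bool) (acc : Nat) (hacc : acc < L) :
    pvLoopA (L : Int) m (acc : Int) = true ↔
      (List.replicate (L - acc) true <+: m ∨ ∃ j, List.replicate L true <+: m.drop (j + 1)) := by
  induction m generalizing acc with
  | nil =>
    simp only [pvLoopA, List.drop_nil, List.prefix_nil, List.replicate_eq_nil_iff]
    constructor
    · intro h; cases h
    · rintro (h | ⟨j, h⟩) <;> omega
  | cons b rest ih =>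
    cases b with
    | false =>
      have hrepl : ¬ (List.replicate (L - acc) true <+: false :: rest) := by
        intro hp
        have : L - acc = (L - acc - 1) + 1 := by omega
        rw [this, List.replicate_succ, List.cons_prefix_cons] at hp
        exact absurd hp.1 (by simp)
      simp only [pvLoopA, if_neg (by simp : ¬ (false = true))]
      rw [show ((0 : Int)) = ((0 : Nat) : Int) by simp] at *
      rw [ih 0 (by omega)]
      simp only [Nat.sub_zero, List.drop_succ_cons, hrepl, false_or]
      exact (exists_drop_shift (fun t => List.replicate L true <+: t) rest).symm
    | true =>
      by_cases heq : acc + 1 = L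
      · have hc : ((acc : Int) + 1 == (L : Int)) = true := by simp; omega
        have hrepl : List.replicate (L - acc) true <+: true :: rest := by
          have : L - acc = 1 := by omega
          rw [this]
          simpa [List.replicate_succ] using List.cons_prefix_cons.mpr ⟨rfl, List.nil_prefix⟩
        simp [pvLoopA, hc, hrepl]
      · have hc : ((acc : Int) + 1 == (L : Int)) = false := by simp; omega
        have hcast : (acc : Int) + 1 = ((acc + 1 : Nat) : Int) := by push_cast; ring
        simp only [pvLoopA, hc, if_neg (by simp : ¬ (false = true)), if_true]
        rw [hcast, ih (acc + 1) (by omega)]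
        have hsplit : List.replicate (L - acc) true <+: true :: rest ↔
            List.replicate (L - (acc + 1)) true <+: rest := by
          have : L - acc = (L - (acc + 1)) + 1 := by omega
          rw [this, List.replicate_succ, List.cons_prefix_cons]
          simp
        rw [hsplit]
        constructor
        · rintro (h | ⟨j, h⟩)
          · exact Or.inl h
          · exact Or.inr ⟨j + 1, by simpa using h⟩
        · rintro (h | ⟨j, h⟩)
          · exact Or.inl h
          · cases j with
            | zero =>
              refine Or.inl (List.IsPrefix.trans ?_ (by simpa using h))
              exact replicate_prefix_of_le true (by omega)
            | succ j => exact Or.inr ⟨j, by simpa using h⟩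

theorem replicate_one_prefix_map (k : Nat) (xs : List Bool) :
    List.replicate k '1' <+: xs.map pvEnc ↔ List.replicate k true <+: xs := by
  induction xs generalizing k with
  | nil =>
    simp [List.prefix_nil, List.replicate_eq_nil_iff]
  | cons x t ih =>
    cases k with
    | zero => simp [List.nil_prefix]
    | succ k =>
      simp only [List.replicate_succ, List.map_cons, List.cons_prefix_cons, ih]
      cases x <;> simp [pvEnc]

theorem posible_alt_iff (s : String) (L : Nat) :
    posible_alt s (L : Int) = true ↔
      ∃ j, List.replicate L true <+:
        ((PySem.List.pyRange 0 ((s.toList.length : Int) - L) 1).map (pvFlag s.toList L)).drop j := by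
  have hjoin : PySem.Chars.join []
      ((PySem.List.pyRange 0 ((s.toList.length : Int) - L) 1).map (altFlag s.toList L)) =
      ((PySem.List.pyRange 0 ((s.toList.length : Int) - L) 1).map (pvFlag s.toList L)).map pvEnc := by
    have : (PySem.List.pyRange 0 ((s.toList.length : Int) - L) 1).map (altFlag s.toList L) =
        (((PySem.List.pyRange 0 ((s.toList.length : Int) - L) 1).map (pvFlag s.toList L)).map pvEnc).map
          (fun c => [c]) := by
      simp only [List.map_map]
      exact List.map_congr_left (fun i _ => altFlag_eq ..)
    rw [this, PySem.Chars.join_nil_singletons]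
  have hrep : PySem.List.pyRepeat ['1'] (L : Int) = List.replicate L '1' := by
    rw [PySem.List.pyRepeat_singleton]; simp
  set ms := (PySem.List.pyRange 0 ((s.toList.length : Int) - L) 1).map (pvFlag s.toList L) with hms
  rw [show posible_alt s (L : Int) =
      (decide ((PySem.Chars.len (PySem.Chars.join []
          ((PySem.List.pyRange 0 ((s.toList.length : Int) - L) 1).map (altFlag s.toList (L : Int))))) ≥ (L : Int)) &&
        PySem.Chars.isIn (PySem.List.pyRepeat ['1'] (L : Int))
          (PySem.Chars.join []
            ((PySem.List.pyRange 0 ((s.toList.length : Int) - L) 1).map (altFlag s.toList (L : Int)))))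
    from rfl]
  rw [hjoin, hrep]
  by_cases hlen : L ≤ ms.length
  · have hd : decide ((PySem.Chars.len (ms.map pvEnc)) ≥ (L : Int)) = true := by
      simp [PySem.Chars.len_eq]; omega
    rw [hd, Bool.true_and, ← PySem.Chars.exists_prefix_drop_iff_isIn]
    constructor
    · rintro ⟨j, hj⟩
      refine ⟨j, ?_⟩
      rw [← replicate_one_prefix_map, List.map_drop]
      exact hj
    · rintro ⟨j, hj⟩
      refine ⟨j, ?_⟩
      rw [← List.map_drop, replicate_one_prefix_map]
      exact hj
  · have hd : decide ((PySem.Chars.len (ms.map pvEnc)) ≥ (L : Int)) = false := by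
      simp [PySem.Chars.len_eq]; omega
    rw [hd, Bool.false_and]
    constructor
    · intro h; cases h
    · rintro ⟨j, hj⟩
      have h1 := hj.length_le
      simp only [List.length_replicate, List.length_drop] at h1
      omega

-- ===== VERDICT (by name: the statement is the Claim_ definition above) =====
theorem posible_spec : Claim_equal_posible := by
  intro s l _ hpre
  unfold Pre_posible at hpre
  unfold Spec_posible
  obtain ⟨L, rfl⟩ : ∃ L : Nat, l = (L : Int) :=
    ⟨l.toNat, (Int.toNat_of_nonneg (by exact le_trans (by omega) hpre)).symm⟩
  have hL : 1 ≤ L := by exact_mod_cast hpre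
  set ms := (PySem.List.pyRange 0 ((s.toList.length : Int) - L) 1).map (pvFlag s.toList L) with hms
  have hbounds : ∀ i ∈ PySem.List.pyRange 0 ((s.toList.length : Int) - L) 1,
      0 ≤ i ∧ i + (L : Int) < (s.toList.length : Int) := by
    intro i hi
    rw [PySem.List.mem_pyRange_one] at hi
    omega
  have hA : posible s (L : Int) = pvLoopA (L : Int) ms 0 := by
    unfold posible
    exact posibleGo_eq_loopA s.toList (L : Int) (by exact_mod_cast hL) _ 0 hbounds
  have h0 : ((0 : Nat) : Int) = (0 : Int) := by simp
  have hiffA : posible s (L : Int) = true ↔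
      (List.replicate L true <+: ms ∨ ∃ j, List.replicate L true <+: ms.drop (j + 1)) := by
    rw [hA, ← h0, loopA_iff L ms 0 (by omega)]
    simp
  have hiffB := posible_alt_iff s L
  rw [Bool.eq_iff_iff, hiffA, hiffB, ← hms]
  exact (exists_drop_shift (fun t => List.replicate L true <+: t) ms).symm
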